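-- pv_equiv track=rewrite | github.com/sapir-amittai/TCRep | create_data_from_blood.py | categorize_numbers
-- ===== SOURCE A (Python) =====
-- from typing import Dict, List
--
-- def categorize_numbers(numbers, sorted_indices) -> Dict[int, List[int]]:
--     categorized = {key: [] for key in sorted_indices}
--     for number in numbers:
--         for index in sorted_indices:
--             if number <= index:
--                 categorized[index].append(number)
--                 break
--     return categorized
-- ===== SOURCE B (Python) =====
-- def categorize_numbers(numbers, sorted_indices):
--     categorized = {}
--     for key in sorted_indices:
--         categorized[key] = []
--     pending = list(numbers)
--     for index in categorized:
--         bucket = categorized[index]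
--         rest = []
--         for number in pending:
--             if number <= index:
--                 bucket.append(number)
--             else:
--                 rest.append(number)
--         pending = rest
--     return categorized
-- ===== Notes on version B (the rewrite author's own statement) =====
-- stated objective: alternative
-- what changed: Transposed loop nesting: B iterates over the (deduplicated) bucket keys as the outer loop and partitions a shrinking 'pending' list of numbers at each key, instead of A's per-number inner scan over sorted_indices with break.
import Mathlib
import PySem

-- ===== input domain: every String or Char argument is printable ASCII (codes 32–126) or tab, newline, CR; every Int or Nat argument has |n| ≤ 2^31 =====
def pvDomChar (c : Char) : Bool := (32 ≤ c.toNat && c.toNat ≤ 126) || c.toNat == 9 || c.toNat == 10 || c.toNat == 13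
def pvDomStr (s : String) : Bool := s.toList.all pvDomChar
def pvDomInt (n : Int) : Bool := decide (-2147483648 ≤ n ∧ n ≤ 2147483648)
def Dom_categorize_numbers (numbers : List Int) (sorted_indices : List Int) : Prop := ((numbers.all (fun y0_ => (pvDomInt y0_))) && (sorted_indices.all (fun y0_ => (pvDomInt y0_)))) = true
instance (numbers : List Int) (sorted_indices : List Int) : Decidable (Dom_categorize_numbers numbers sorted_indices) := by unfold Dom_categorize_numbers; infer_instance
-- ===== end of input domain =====

-- B transposes the loop nesting (outer loop over the bucket keys, inner single pass over numbers with an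
-- explicit pending list) instead of A's per-number scan over sorted_indices with break; same cost, alternative algorithm.

-- ===== PORT A =====
-- inner 'for index in sorted_indices: if number <= index: categorized[index].append(number); break'
-- (the appended-to key always exists in the dict, so Dict.modify with default [] is exact)
def pvAInner (d : PySem.Dict Int (List Int)) (number : Int) : List Int → PySem.Dict Int (List Int)
  | [] => d
  | index :: rest =>
      if number ≤ index then d.modify index [] (fun l => l ++ [number])
      else pvAInner d number rest

def categorize_numbers (numbers : List Int) (sorted_indices : List Int) : List (Int × List Int) :=
  let categorized := sorted_indices.foldl (fun d key => d.insert key ([] : List Int)) PySem.Dict.empty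
  (numbers.foldl (fun d number => pvAInner d number sorted_indices) categorized).items

-- ===== PORT B =====
-- one pass over the pending numbers for a fixed bucket key: bucket gets those <= index, rest stays pending
def pvBScan (index : Int) : List Int → List Int × List Int
  | [] => ([], [])
  | n :: ns =>
      let r := pvBScan index ns
      if n ≤ index then (n :: r.1, r.2) else (r.1, n :: r.2)

-- outer loop 'for index in categorized', threading the pending list
def pvBOuter : List Int → List Int → List (Int × List Int)
  | [], _ => []
  | k :: ks, pending =>
      let r := pvBScan k pending
      (k, r.1) :: pvBOuter ks r.2

def categorize_numbers_alt (numbers : List Int) (sorted_indices : List Int) : List (Int × List Int) :=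
  let categorized := sorted_indices.foldl (fun d key => d.insert key ([] : List Int)) PySem.Dict.empty
  pvBOuter categorized.keys numbers

-- ===== PRECONDITION & SPEC =====
def Spec_categorize_numbers (numbers : List Int) (sorted_indices : List Int) (out : List (Int × List Int)) : Prop := out = categorize_numbers_alt numbers sorted_indices
instance (numbers : List Int) (sorted_indices : List Int) (out : List (Int × List Int)) : Decidable (Spec_categorize_numbers numbers sorted_indices out) := by unfold Spec_categorize_numbers; infer_instance

-- ===== CLAIM (what is proved, stated in full; the proofs are below) =====
def Claim_equal_categorize_numbers : Prop := ∀ (numbers : List Int) (sorted_indices : List Int), Dom_categorize_numbers numbers sorted_indices → Spec_categorize_numbers numbers sorted_indices (categorize_numbers numbers sorted_indices)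

-- ===== LEMMAS AND PROOFS =====

-- A's inner loop resolved: it modifies the first index with number <= index, if any
theorem pvAInner_eq (number : Int) (d : PySem.Dict Int (List Int)) :
    ∀ idxs : List Int, pvAInner d number idxs =
      match idxs.find? (fun x => decide (number ≤ x)) with
      | some i => d.modify i [] (fun l => l ++ [number])
      | none => d := by
  intro idxs
  induction idxs with
  | nil => simp [pvAInner]
  | cons i rest ih =>
      by_cases h : number ≤ i
      · simp [pvAInner, h, List.find?]
      · simp [pvAInner, h, List.find?, ih]

-- keys are untouched by A's number loop (every find? result is an existing key)
theorem pvAfold_keys (si : List Int) :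
    ∀ (nums : List Int) (d : PySem.Dict Int (List Int)), (∀ i ∈ si, i ∈ d.keys) →
      (nums.foldl (fun d n => pvAInner d n si) d).keys = d.keys := by
  intro nums
  induction nums with
  | nil => intro d _; rfl
  | cons n ns ih =>
      intro d hd
      have hstep : (pvAInner d n si).keys = d.keys := by
        rw [pvAInner_eq]
        cases hfind : si.find? (fun x => decide (n ≤ x)) with
        | none => rfl
        | some i =>
            have hi : i ∈ si := List.mem_of_find?_eq_some hfind
            have hc : d.contains i = true := (PySem.Dict.contains_iff_mem_keys d i).2 (hd i hi)
            rw [PySem.Dict.keys_modify, PySem.Dict.keys_insert_of_contains d _ hc]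
      have := ih (pvAInner d n si) (by intro i hi; rw [hstep]; exact hd i hi)
      simpa [hstep] using this

-- value of a bucket after A's number loop
theorem pvAfold_getD (si : List Int) :
    ∀ (nums : List Int) (d : PySem.Dict Int (List Int)) (k : Int),
      (nums.foldl (fun d n => pvAInner d n si) d).getD k [] =
        d.getD k [] ++ nums.filter (fun n => si.find? (fun x => decide (n ≤ x)) == some k) := by
  intro nums
  induction nums with
  | nil => intro d k; simp
  | cons n ns ih =>
      intro d k
      rw [List.foldl_cons, List.filter_cons, ih (pvAInner d n si) k, pvAInner_eq]
      cases hfind : si.find? (fun x => decide (n ≤ x)) with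
      | none => simp
      | some i =>
          by_cases hk : i = k
          · subst hk
            simp
          · have : ((some i == some k) : Bool) = false := by
              simp; exact hk
            simp [PySem.Dict.getD_modify, Ne.symm hk, this]

-- the initializing dict loop leaves every bucket empty
theorem pvInit_getD (si : List Int) :
    ∀ (d : PySem.Dict Int (List Int)), (∀ k, d.getD k [] = []) →
      ∀ k, (si.foldl (fun d key => d.insert key ([] : List Int)) d).getD k [] = [] := by
  induction si with
  | nil => intro d hd k; exact hd k
  | cons x xs ih =>
      intro d hd k
      refine ih (d.insert x []) ?_ k
      intro k'
      rw [PySem.Dict.getD_insert]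
      split <;> simp [hd]

-- B's inner pass is a partition of the pending list at the key
theorem pvBScan_eq (k : Int) :
    ∀ pending : List Int,
      pvBScan k pending =
        (pending.filter (fun n => decide (n ≤ k)), pending.filter (fun n => !decide (n ≤ k))) := by
  intro pending
  induction pending with
  | nil => simp [pvBScan]
  | cons n ns ih =>
      by_cases hk : n ≤ k
      · simp [pvBScan, ih, hk]
      · simp [pvBScan, ih, hk]

-- pending after the keys P = the numbers covered by no key of P
theorem pvPending_step (k : Int) (nums P : List Int) :
    (nums.filter (fun n => !P.any (fun x => decide (n ≤ x)))).filter (fun n => !decide (n ≤ k)) =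
      nums.filter (fun n => !(P ++ [k]).any (fun x => decide (n ≤ x))) := by
  rw [List.filter_filter]
  refine List.filter_congr fun n _ => ?_
  simp [List.any_append, Bool.and_comm]

-- "not covered by an earlier key and covered by k" = "k is the first covering key of the whole list"
theorem pvFind_pred (n k : Int) :
    ∀ (P ks : List Int), (P ++ k :: ks).Nodup →
      (!P.any (fun x => decide (n ≤ x)) && decide (n ≤ k)) =
        ((P ++ k :: ks).find? (fun x => decide (n ≤ x)) == some k) := by
  intro P
  induction P with
  | nil =>
      intro ks hnd
      by_cases hk : n ≤ k
      · simp [hk]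
      · have hkks : k ∉ ks := by simp at hnd; exact hnd.1
        simp only [List.nil_append, List.any_nil, Bool.not_false, Bool.true_and, List.find?]
        have : decide (n ≤ k) = false := by simp [hk]
        rw [this]
        cases hfind : ks.find? (fun x => decide (n ≤ x)) with
        | none => simp
        | some j =>
            have hj : j ∈ ks := List.mem_of_find?_eq_some hfind
            have : j ≠ k := fun h => hkks (h ▸ hj)
            simp [this]
  | cons p P ih =>
      intro ks hnd
      have hnd' : (P ++ k :: ks).Nodup := hnd.of_cons
      by_cases hp : n ≤ p
      · have hpk : p ≠ k := by
          have : p ∉ P ++ k :: ks := (List.nodup_cons.1 hnd).1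
          intro h; exact this (by simp [h])
        simp [hp, hpk]
      · simpa [List.find?, hp] using ih ks hnd'

-- B's outer loop produces, for each key, the numbers whose first covering key it is
theorem pvBOuter_eq (nums : List Int) :
    ∀ (ks P : List Int), (P ++ ks).Nodup →
      pvBOuter ks (nums.filter (fun n => !P.any (fun x => decide (n ≤ x)))) =
        ks.map (fun k => (k, nums.filter (fun n => (P ++ ks).find? (fun x => decide (n ≤ x)) == some k))) := by
  intro ks
  induction ks with
  | nil => intro P _; simp [pvBOuter]
  | cons k ks ih =>
      intro P hnd
      have hbucket : (nums.filter (fun n => !P.any (fun x => decide (n ≤ x)))).filter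
          (fun n => decide (n ≤ k)) =
          nums.filter (fun n => ((P ++ k :: ks).find? (fun x => decide (n ≤ x)) == some k)) := by
        rw [List.filter_filter]
        refine List.filter_congr fun n _ => ?_
        rw [Bool.and_comm]
        exact pvFind_pred n k P ks hnd
      have hnd2 : ((P ++ [k]) ++ ks).Nodup := by simpa using hnd
      have htail := ih (P ++ [k]) hnd2
      simp only [pvBOuter, pvBScan_eq]
      rw [pvPending_step k nums P, htail, hbucket]
      have : (P ++ [k]) ++ ks = P ++ k :: ks := by simp
      rw [this, List.map_cons]

-- find? is insensitive to removing later duplicates: over set(xs) it agrees with over xs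
theorem pvFind?_discard (p : Int → Bool) (x : Int) (hx : p x = false) :
    ∀ l : List Int, (PySem.Set.discard l x).find? p = l.find? p := by
  intro l
  induction l with
  | nil => rfl
  | cons y l ih =>
      by_cases hxy : y = x
      · subst hxy
        simp [PySem.Set.discard, List.find?, hx] at *
        exact ih
      · by_cases hp : p y = true
        · simp [PySem.Set.discard, hxy, List.find?, hp]
        · simp only [Bool.not_eq_true] at hp
          simp [PySem.Set.discard, hxy, List.find?, hp] at *
          exact ih

theorem pvFind?_ofList (p : Int → Bool) :
    ∀ xs : List Int, (PySem.Set.ofList xs).find? p = xs.find? p := by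
  intro xs
  induction xs with
  | nil => rfl
  | cons x xs ih =>
      rw [PySem.Set.ofList_cons]
      by_cases hp : p x = true
      · simp [List.find?, hp]
      · simp only [Bool.not_eq_true] at hp
        simp [List.find?, hp, pvFind?_discard p x hp, ih]

-- keys of the initializing loop = set(sorted_indices)
theorem pvInit_keys (si : List Int) :
    (si.foldl (fun d key => d.insert key ([] : List Int)) PySem.Dict.empty).keys = PySem.Set.ofList si := by
  have h := PySem.Dict.keys_foldl_insert si (fun _ _ => ([] : List Int)) PySem.Dict.empty
  simpa [PySem.Dict.keys_empty, PySem.Set.update_nil_left] using h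

-- ===== VERDICT (by name: the statement is the Claim_ definition above) =====
theorem categorize_numbers_spec : Claim_equal_categorize_numbers := by
  intro numbers si _
  unfold Spec_categorize_numbers categorize_numbers categorize_numbers_alt
  simp only []
  set cat0 := si.foldl (fun d key => d.insert key ([] : List Int)) PySem.Dict.empty with hcat0
  have hkeys0 : cat0.keys = PySem.Set.ofList si := pvInit_keys si
  have hnodup : cat0.keys.Nodup := by rw [hkeys0]; exact PySem.Set.nodup_ofList si
  have hmem : ∀ i ∈ si, i ∈ cat0.keys := by
    intro i hi; rw [hkeys0]; exact (PySem.Set.mem_ofList si i).2 hi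
  have hk := pvAfold_keys si numbers cat0 hmem
  have hnodup' : (numbers.foldl (fun d n => pvAInner d n si) cat0).keys.Nodup := by
    rw [hk]; exact hnodup
  -- A side: items as a map over the keys
  rw [PySem.Dict.items_eq_map_keys _ hnodup' ([] : List Int), hk, hkeys0]
  -- B side
  have hid : numbers = numbers.filter (fun n => !([] : List Int).any (fun x => decide (n ≤ x))) := by
    simp
  have hB : pvBOuter (PySem.Set.ofList si) numbers =
      (PySem.Set.ofList si).map (fun k => (k, numbers.filter
        (fun n => (([] : List Int) ++ PySem.Set.ofList si).find? (fun x => decide (n ≤ x)) == some k))) := by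
    conv_lhs => rw [hid]
    exact pvBOuter_eq numbers (PySem.Set.ofList si) [] (by simp [PySem.Set.nodup_ofList])
  rw [hB]
  refine List.map_congr_left ?_
  intro k hkmem
  simp only [List.nil_append]
  rw [pvAfold_getD si numbers cat0 k, pvInit_getD si PySem.Dict.empty (by simp) k]
  simp only [List.nil_append]
  congr 1
  refine List.filter_congr fun n _ => ?_
  rw [pvFind?_ofList]
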